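-- pv_equiv track=rewrite | github.com/PaddlePaddle/Paddle | python/paddle/distributed/auto_parallel/rules.py | compute_compatible_dims_mapping
-- ===== SOURCE A (Python) =====
-- def compute_compatible_dim_mapping(dim_mapping_list):
--     """Compute the compatible dim mapping given a list of dim mapping."""
--     if not dim_mapping_list:
--         return None
--
--     def _compute_compatible_dim_mapping_two(dm1, dm2):
--         if dm1 == -1:
--             return True, dm2
--         if dm2 == -1:
--             return True, dm1
--         if dm1 == dm2:
--             return True, dm1
--         return False, None
--
--     compatible_result = -1
--     for mapping in dim_mapping_list:
--         compatible, compatible_result = _compute_compatible_dim_mapping_two(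
--             compatible_result, mapping)
--         if not compatible:
--             return None
--     return compatible_result
--
-- def compute_compatible_dims_mapping(dims_mapping_list):
--     """Compute the compatible dims mapping given a list of dims mapping.
--        Each of dims mapping is also a list.
--     """
--     if not dims_mapping_list:
--         return None
--     length = len(dims_mapping_list[0])
--     for dims_mapping in dims_mapping_list:
--         if dims_mapping is None:
--             return None
--         if len(dims_mapping) != length:
--             return None
--     compatible_result = []
--     for dim_mappings in zip(*dims_mapping_list):
--         compatible_dim_mapping = compute_compatible_dim_mapping(
--             list(dim_mappings))
--         if compatible_dim_mapping is None:
--             return None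
--         compatible_result.append(compatible_dim_mapping)
--     return compatible_result
-- ===== SOURCE B (Python) =====
-- def compute_compatible_dims_mapping(dims_mapping_list):
--     """Row-wise single pass: merge each mapping into an accumulator of
--     per-dimension results, instead of transposing and folding columns."""
--     if not dims_mapping_list:
--         return None
--     length = len(dims_mapping_list[0])
--     result = [-1] * length
--     for row in dims_mapping_list:
--         if row is None or len(row) != length:
--             return None
--         for i, v in enumerate(row):
--             if result[i] == -1:
--                 result[i] = v
--             elif v != -1 and v != result[i]:
--                 return None
--     return result
-- ===== Notes on version B (the rewrite author's own statement) =====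
-- stated objective: simpler
-- what changed: Replaced the transpose (zip(*rows)) plus per-column helper-function fold with one row-wise pass that merges each mapping into a flat accumulator, removing the helper and the column materialisation.
import Mathlib
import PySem

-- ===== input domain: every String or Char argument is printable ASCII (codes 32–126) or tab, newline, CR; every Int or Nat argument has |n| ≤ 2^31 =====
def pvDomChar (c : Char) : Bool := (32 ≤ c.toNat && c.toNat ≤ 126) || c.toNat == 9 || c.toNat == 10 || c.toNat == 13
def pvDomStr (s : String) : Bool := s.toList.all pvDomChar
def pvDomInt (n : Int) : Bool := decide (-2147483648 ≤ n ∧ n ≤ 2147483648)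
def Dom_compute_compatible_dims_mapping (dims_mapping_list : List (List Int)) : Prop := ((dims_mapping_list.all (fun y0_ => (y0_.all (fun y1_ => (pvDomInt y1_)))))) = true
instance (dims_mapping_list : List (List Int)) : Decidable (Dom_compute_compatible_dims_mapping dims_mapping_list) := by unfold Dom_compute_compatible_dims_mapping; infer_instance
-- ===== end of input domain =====

-- B replaces A's transpose-then-fold-columns (zip(*rows) + helper) by one row-wise
-- merging pass over the mappings; objective: simpler (no speed claim).

-- ===== PORT A =====
-- helper _compute_compatible_dim_mapping_two: the (False, None) pair is modelled as
-- none, (True, r) as some r (the second component is only read when compatible).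
def ccdm_two (dm1 dm2 : Int) : Option Int :=
  if dm1 = -1 then some dm2
  else if dm2 = -1 then some dm1
  else if dm1 = dm2 then some dm1
  else none

-- the 'for mapping in dim_mapping_list' loop of compute_compatible_dim_mapping
def ccdm_loop : Int → List Int → Option Int
  | acc, [] => some acc
  | acc, m :: rest =>
    match ccdm_two acc m with
    | some r => ccdm_loop r rest
    | none => none

def compute_compatible_dim_mapping (dim_mapping_list : List Int) : Option Int :=
  if dim_mapping_list = [] then none
  else ccdm_loop (-1) dim_mapping_list

-- zip(*rows): Python's zip truncates at the shortest row; structural on the first row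
def zipStarGo : List Int → List (List Int) → List (List Int)
  | [], _ => []
  | a :: as_, rest =>
    if rest.any (·.isEmpty) then []
    else (a :: rest.map (·.headD 0)) :: zipStarGo as_ (rest.map (·.tail))

def pyZipStar : List (List Int) → List (List Int)
  | [] => []
  | r :: rest => zipStarGo r rest

-- the 'for dim_mappings in zip(*dims_mapping_list)' loop, appending to compatible_result
def ccdms_loop : List Int → List (List Int) → Option (List Int)
  | acc, [] => some acc
  | acc, c :: cols =>
    match compute_compatible_dim_mapping c with
    | none => none
    | some v => ccdms_loop (acc ++ [v]) cols

def compute_compatible_dims_mapping (dims_mapping_list : List (List Int)) : Option (List Int) :=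
  if dims_mapping_list = [] then none
  else
    let length := (dims_mapping_list.headD []).length
    -- the 'dims_mapping is None' branch cannot fire: elements are List Int here
    if dims_mapping_list.any (fun d => d.length ≠ length) then none
    else ccdms_loop [] (pyZipStar dims_mapping_list)

-- ===== PORT B =====
-- the inner 'for i, v in enumerate(row)' loop: merge one row into the accumulator
def mergeRow : List Int → List Int → Option (List Int)
  | _, [] => some []
  | [], _ :: _ => some []
  | a :: as_, v :: vs =>
    if a = -1 then (mergeRow as_ vs).map (v :: ·)
    else if v ≠ -1 ∧ v ≠ a then none
    else (mergeRow as_ vs).map (a :: ·)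

-- the outer 'for row in dims_mapping_list' loop
def bLoop : List Int → List (List Int) → Option (List Int)
  | acc, [] => some acc
  | acc, row :: rest =>
    if row.length ≠ acc.length then none
    else
      match mergeRow acc row with
      | none => none
      | some acc' => bLoop acc' rest

def compute_compatible_dims_mapping_alt (dims_mapping_list : List (List Int)) : Option (List Int) :=
  match dims_mapping_list with
  | [] => none
  | first :: _ => bLoop (List.replicate first.length (-1)) dims_mapping_list

-- ===== PRECONDITION & SPEC =====
def Spec_compute_compatible_dims_mapping (dims_mapping_list : List (List Int)) (out : Option (List Int)) : Prop := out = compute_compatible_dims_mapping_alt dims_mapping_list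
instance (dims_mapping_list : List (List Int)) (out : Option (List Int)) : Decidable (Spec_compute_compatible_dims_mapping dims_mapping_list out) := by unfold Spec_compute_compatible_dims_mapping; infer_instance

-- ===== CLAIM (what is proved, stated in full; the proofs are below) =====
def Claim_equal_compute_compatible_dims_mapping : Prop := ∀ (dims_mapping_list : List (List Int)), Dom_compute_compatible_dims_mapping dims_mapping_list → Spec_compute_compatible_dims_mapping dims_mapping_list (compute_compatible_dims_mapping dims_mapping_list)

-- ===== LEMMAS AND PROOFS =====

-- column-wise specification both ports are reduced to: entry i is the ccdm-fold of
-- column i started at acc_i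
def colwise : List Int → List (List Int) → Option (List Int)
  | [], _ => some []
  | a :: as_, rows =>
    (ccdm_loop a (rows.map (·.headD 0))).bind fun w =>
      (colwise as_ (rows.map (·.tail))).map (w :: ·)

theorem colwise_nil (acc : List Int) : colwise acc [] = some acc := by
  induction acc with
  | nil => rfl
  | cons a as_ ih => simp [colwise, ccdm_loop, ih]

theorem mergeRow_cons (a v : Int) (as_ vs : List Int) :
    mergeRow (a :: as_) (v :: vs) =
      (ccdm_two a v).bind fun u => (mergeRow as_ vs).map (u :: ·) := by
  by_cases h1 : a = -1 <;> by_cases h2 : v = -1 <;> by_cases h3 : a = v <;>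
    simp_all [mergeRow, ccdm_two] <;> simp [eq_comm] at * <;> simp_all

theorem mergeRow_length {as_ vs out : List Int} (hl : vs.length = as_.length)
    (h : mergeRow as_ vs = some out) : out.length = as_.length := by
  induction as_ generalizing vs out with
  | nil =>
    cases vs with
    | nil => simp [mergeRow] at h; simp [h.symm]
    | cons v vt => simp at hl
  | cons a t ih =>
    cases vs with
    | nil => simp at hl
    | cons v vt =>
      have hl' : vt.length = t.length := by simpa using hl
      rw [mergeRow_cons] at h
      cases hu : ccdm_two a v with
      | none => simp [hu] at h
      | some u =>
        simp [hu] at h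
        obtain ⟨o, ho, rfl⟩ := h
        simp [ih hl' ho]

theorem ccdm_loop_cons (a v : Int) (col : List Int) :
    ccdm_loop a (v :: col) = (ccdm_two a v).bind fun u => ccdm_loop u col := by
  cases h : ccdm_two a v <;> simp [ccdm_loop, h]

theorem colwise_cons (acc r : List Int) (rest : List (List Int))
    (hlen : r.length = acc.length) :
    colwise acc (r :: rest) =
      (mergeRow acc r).bind fun acc' => colwise acc' rest := by
  induction acc generalizing r rest with
  | nil =>
    have : r = [] := List.eq_nil_of_length_eq_zero (by simpa using hlen)
    subst this
    simp [colwise, mergeRow, colwise_nil]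
  | cons a as_ ih =>
    cases r with
    | nil => simp at hlen
    | cons v vt =>
      have hvt : vt.length = as_.length := by simpa using hlen
      rw [mergeRow_cons]
      show (ccdm_loop a (v :: rest.map (·.headD 0))).bind _ = _
      rw [ccdm_loop_cons]
      cases h : ccdm_two a v with
      | none => simp
      | some u =>
        simp only [Option.bind_some]
        show (ccdm_loop u (rest.map (·.headD 0))).bind
              (fun w => (colwise as_ (vt :: rest.map (·.tail))).map (w :: ·)) = _
        rw [ih vt (rest.map (·.tail)) hvt]
        cases hm : mergeRow as_ vt with
        | none => cases ccdm_loop u (rest.map (·.headD 0)) <;> simp [hm]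
        | some as' =>
          have hcw : colwise (u :: as') rest =
              (ccdm_loop u (rest.map (·.headD 0))).bind fun w =>
                (colwise as' (rest.map (·.tail))).map (w :: ·) := rfl
          simp only [Option.map_some, Option.bind_some]
          rw [hcw]

theorem bLoop_eq_colwise (rows : List (List Int)) (acc : List Int)
    (h : ∀ r ∈ rows, r.length = acc.length) :
    bLoop acc rows = colwise acc rows := by
  induction rows generalizing acc with
  | nil => simp [bLoop, colwise_nil]
  | cons r rest ih =>
    have hr : r.length = acc.length := h r (by simp)
    rw [colwise_cons acc r rest hr]
    show (if r.length ≠ acc.length then none else _) = _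
    rw [if_neg (by simp [hr])]
    cases hm : mergeRow acc r with
    | none => simp
    | some acc' =>
      simp only [Option.bind_some]
      exact ih acc' (fun x hx => by
        rw [mergeRow_length hr hm]
        exact h x (by simp [hx]))

theorem ccdms_loop_append (cols : List (List Int)) (acc : List Int) :
    ccdms_loop acc cols = (ccdms_loop [] cols).map (acc ++ ·) := by
  induction cols generalizing acc with
  | nil => simp [ccdms_loop]
  | cons c cols ih =>
    show (match compute_compatible_dim_mapping c with
          | none => none | some v => ccdms_loop (acc ++ [v]) cols) = _
    cases h : compute_compatible_dim_mapping c with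
    | none => simp [ccdms_loop, h]
    | some v =>
      simp only [ccdms_loop, h]
      rw [ih (acc ++ [v]), ih ([] ++ [v])]
      cases ccdms_loop [] cols <;> simp

theorem A_eq_colwise (r : List Int) (rest : List (List Int))
    (h : ∀ x ∈ rest, x.length = r.length) :
    ccdms_loop [] (zipStarGo r rest) = colwise (List.replicate r.length (-1)) (r :: rest) := by
  induction r generalizing rest with
  | nil =>
    simp [zipStarGo, ccdms_loop, colwise]
  | cons a as_ ih =>
    have hne : rest.any (·.isEmpty) = false := by
      simp only [List.any_eq_false]
      intro x hx
      have := h x hx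
      cases x with
      | nil => simp at this
      | cons _ _ => simp
    simp only [zipStarGo, hne, Bool.false_eq_true, if_false]
    have hcol : compute_compatible_dim_mapping (a :: rest.map (·.headD 0)) =
        ccdm_loop (-1) (a :: rest.map (·.headD 0)) := by
      simp [compute_compatible_dim_mapping]
    show (match compute_compatible_dim_mapping (a :: rest.map (·.headD 0)) with
          | none => none
          | some v => ccdms_loop ([] ++ [v]) (zipStarGo as_ (List.map List.tail rest))) = _
    have ihh : ccdms_loop [] (zipStarGo as_ (List.map List.tail rest)) =
        colwise (List.replicate as_.length (-1)) (as_ :: List.map List.tail rest) := by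
      apply ih
      intro x hx
      simp only [List.mem_map] at hx
      obtain ⟨y, hy, rfl⟩ := hx
      have := h y hy
      cases y with
      | nil => simp at this
      | cons _ _ => simpa using this
    have rhs : colwise (List.replicate (a :: as_).length (-1)) ((a :: as_) :: rest) =
        (ccdm_loop (-1) (a :: rest.map (·.headD 0))).bind fun w =>
          (colwise (List.replicate as_.length (-1)) (as_ :: List.map List.tail rest)).map
            (w :: ·) := by
      simp [colwise, List.replicate_succ]
    rw [rhs, ← ihh, hcol]
    cases hL : ccdm_loop (-1) (a :: rest.map (·.headD 0)) with
    | none => simp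
    | some w =>
      simp only [Option.bind_some]
      rw [ccdms_loop_append]
      cases ccdms_loop [] (zipStarGo as_ (List.map List.tail rest)) <;> simp

theorem bLoop_badlen (rows : List (List Int)) (acc : List Int)
    (h : ∃ r ∈ rows, r.length ≠ acc.length) :
    bLoop acc rows = none := by
  induction rows generalizing acc with
  | nil => simp at h
  | cons r rest ih =>
    show (if r.length ≠ acc.length then none else _) = _
    by_cases hr : r.length = acc.length
    · rw [if_neg (by simp [hr])]
      cases hm : mergeRow acc r with
      | none => simp
      | some acc' =>
        apply ih
        obtain ⟨x, hx, hxl⟩ := h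
        rcases List.mem_cons.mp hx with hx' | hx'
        · subst hx'; exact absurd hr hxl
        · exact ⟨x, hx', by rw [mergeRow_length hr hm]; exact hxl⟩
    · rw [if_pos (by simp [hr])]

-- ===== VERDICT (by name: the statement is the Claim_ definition above) =====
theorem compute_compatible_dims_mapping_spec : Claim_equal_compute_compatible_dims_mapping := by
  intro l _
  unfold Spec_compute_compatible_dims_mapping
  cases l with
  | nil => rfl
  | cons first rest =>
    have halt : compute_compatible_dims_mapping_alt (first :: rest) =
        bLoop (List.replicate first.length (-1)) (first :: rest) := rfl
    rw [halt]
    show compute_compatible_dims_mapping (first :: rest) = _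
    unfold compute_compatible_dims_mapping
    rw [if_neg (by simp)]
    by_cases hlen : (first :: rest).any
        (fun d => d.length ≠ (List.headD (first :: rest) []).length)
    · simp only [hlen, if_true]
      obtain ⟨x, hx, hxl⟩ := List.any_eq_true.mp hlen
      have hx' : x.length ≠ first.length := by simpa using hxl
      have hb := bLoop_badlen (first :: rest) (List.replicate first.length (-1))
        ⟨x, hx, by simpa using hx'⟩
      rw [hb]
    · simp only [hlen, Bool.false_eq_true, if_false]
      have hall : ∀ x ∈ (first :: rest), x.length = first.length := by
        simp only [List.any_eq_true, not_exists, decide_eq_true_eq, not_and] at hlen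
        intro x hx
        by_contra hc
        exact hlen x hx (by simpa using hc)
      rw [bLoop_eq_colwise _ _ (by
        intro x hx
        rw [List.length_replicate]
        exact hall x hx)]
      show ccdms_loop [] (zipStarGo first rest) = _
      exact A_eq_colwise first rest (fun x hx => hall x (by simp [hx]))
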